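-- pv_equiv track=rewrite | github.com/rupafn/leetcode | easy/verifyingAnAlienDictionary.py | isAlienSorted
-- ===== SOURCE A (Python) =====
-- def isAlienSorted(words, order):
--     dictt = {}
--     for i in range(0,len(order)):
--         dictt[order[i]]= i
--     listCount = [0]*len(words)
--     i = 0
--     for w in words:
--         for j in w:
--             listCount[i]+=dictt[j]
--         i+=1
--     newList = listCount[:]
--     listCount.sort()
--     if(listCount!=newList):
--         return False
--     return True
--
-- words = ["hello","leetcode"]
--
-- order = "hlabcdefgijkmnopqrstuvwxyz"
-- ===== SOURCE B (Python) =====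
-- def isAlienSorted(words, order):
--     idx = {c: i for i, c in enumerate(order)}
--     prev = None
--     for w in words:
--         s = 0
--         for c in w:
--             s += idx[c]
--         if prev is not None and s < prev:
--             return False
--         prev = s
--     return True
-- ===== Notes on version B (the rewrite author's own statement) =====
-- stated objective: faster
-- what changed: Replaced copy+in-place-sort+list-compare of the summed values with a single pass that checks the running sums are non-decreasing, so no O(n log n) sort and no extra lists.
import Mathlib
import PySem

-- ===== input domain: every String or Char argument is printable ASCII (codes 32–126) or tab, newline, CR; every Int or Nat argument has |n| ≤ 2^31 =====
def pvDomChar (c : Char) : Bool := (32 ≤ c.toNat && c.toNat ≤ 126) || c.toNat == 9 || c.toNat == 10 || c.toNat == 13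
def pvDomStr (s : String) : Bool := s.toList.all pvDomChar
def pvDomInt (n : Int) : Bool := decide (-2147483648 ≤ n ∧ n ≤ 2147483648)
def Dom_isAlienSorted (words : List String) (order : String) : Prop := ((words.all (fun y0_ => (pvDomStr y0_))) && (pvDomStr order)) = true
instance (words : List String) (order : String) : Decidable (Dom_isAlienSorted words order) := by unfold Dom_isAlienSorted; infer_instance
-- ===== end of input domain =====

-- B replaces A's copy + in-place sort + list comparison of the summed values by a
-- single pass checking the running sums are non-decreasing (return value only; A
-- also mutates nothing observable to the caller).

-- ===== PORT A =====
-- dictt[j] raises KeyError for a char absent from order; Pre_ guarantees presence,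
-- so the total form getD 0 is exact on the claimed inputs.
def isAlienSorted (words : List String) (order : String) : Bool :=
  let dictt : PySem.Dict Char Int :=
    (PySem.List.pyRange 0 (order.toList.length) 1).foldl
      (fun d i => d.insert (PySem.List.pyGetD order.toList i ' ') i) PySem.Dict.empty
  let listCount : List Int := List.replicate words.length 0
  let st :=
    words.foldl
      (fun (st : List Int × Int) w =>
        let lc := w.toList.foldl
          (fun lc j =>
            PySem.List.pySetD lc st.2 (PySem.List.pyGetD lc st.2 0 + dictt.getD j 0)) st.1
        (lc, st.2 + 1))
      (listCount, (0 : Int))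
  let newList := st.1
  let sortedL := PySem.List.sorted st.1 (fun x => x) false
  if sortedL ≠ newList then false else true

-- ===== PORT B =====
-- idx[c] raises KeyError for a char absent from order; Pre_ guarantees presence,
-- so the total form getD 0 is exact on the claimed inputs.
def altLoop (idx : PySem.Dict Char Int) : List String → Option Int → Bool
  | [], _ => true
  | w :: ws, prev =>
    let s := w.toList.foldl (fun s c => s + idx.getD c 0) 0
    match prev with
    | some p => if s < p then false else altLoop idx ws (some s)
    | none => altLoop idx ws (some s)

def isAlienSorted_alt (words : List String) (order : String) : Bool :=
  let idx : PySem.Dict Char Int :=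
    (PySem.List.enumerate order.toList 0).foldl (fun d p => d.insert p.2 p.1) PySem.Dict.empty
  altLoop idx words none

-- ===== PRECONDITION & SPEC =====
-- Pre_ excludes exactly the inputs where some word contains a character not in
-- order: there Python A (and Python B) raise KeyError.
def Pre_isAlienSorted (words : List String) (order : String) : Prop :=
  (words.all (fun w => w.toList.all (fun c => order.toList.contains c))) = true
instance (words : List String) (order : String) : Decidable (Pre_isAlienSorted words order) := by
  unfold Pre_isAlienSorted; infer_instance

def pvWitness_isAlienSorted : List String × String := (["ab", "ba"], "ab")

def Spec_isAlienSorted (words : List String) (order : String) (out : Bool) : Prop := out = isAlienSorted_alt words order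
instance (words : List String) (order : String) (out : Bool) : Decidable (Spec_isAlienSorted words order out) := by unfold Spec_isAlienSorted; infer_instance

-- ===== CLAIM (what is proved, stated in full; the proofs are below) =====
def Claim_equal_isAlienSorted : Prop := ∀ (words : List String) (order : String), Dom_isAlienSorted words order → Pre_isAlienSorted words order → Spec_isAlienSorted words order (isAlienSorted words order)

-- ===== LEMMAS AND PROOFS =====

-- the two dict builds produce the same Dict
theorem dict_build_eq (full : List Char) (xs : List Char) (s : Int) (d : PySem.Dict Char Int)
    (h : ∀ (k : Nat) (hk : k < xs.length), PySem.List.pyGetD full (s + k) ' ' = xs[k]) :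
    (PySem.List.pyRange s (s + xs.length) 1).foldl
        (fun d i => d.insert (PySem.List.pyGetD full i ' ') i) d
      = (PySem.List.enumerate xs s).foldl (fun d p => d.insert p.2 p.1) d := by
  induction xs generalizing s d with
  | nil => simp [PySem.List.pyRange_one_eq_nil, PySem.List.enumerate_nil]
  | cons x xs ih =>
    rw [PySem.List.pyRange_one_cons (by simp), PySem.List.enumerate_cons]
    simp only [List.foldl_cons]
    have h0 := h 0 (by simp)
    simp at h0
    rw [h0]
    have : s + (x :: xs).length = (s + 1) + xs.length := by simp; omega
    rw [this, ih (s + 1)]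
    intro k hk
    have := h (k + 1) (by simpa using Nat.succ_lt_succ hk)
    simpa [add_comm, add_assoc, add_left_comm] using this

-- the inner character loop adds the word's sum at position i
theorem inner_loop_eq (f : Char → Int) (cs : List Char) (lc : List Int) (i : Nat)
    (hi : i < lc.length) :
    cs.foldl (fun lc j => PySem.List.pySetD lc (i : Int) (PySem.List.pyGetD lc (i : Int) 0 + f j)) lc
      = lc.set i (lc.getD i 0 + (cs.map f).sum) := by
  induction cs generalizing lc with
  | nil =>
    rw [List.getD_eq_getElem lc 0 hi]
    simp [List.set_getElem_self hi]
  | cons c cs ih =>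
    simp only [List.foldl_cons]
    rw [show PySem.List.pySetD lc (i : Int) (PySem.List.pyGetD lc (i : Int) 0 + f c)
        = lc.set i (lc.getD i 0 + f c) by simp]
    rw [ih _ (by simpa using hi)]
    rw [List.getD_eq_getElem (lc.set i (lc.getD i 0 + f c)) 0 (by simpa using hi),
      List.getElem_set_self (by simpa using hi), List.set_set]
    simp [add_assoc]

-- the outer loop of A builds the map of word sums
theorem outer_loop_eq (f : Char → Int) (ws : List String) (acc : List Int) :
    ws.foldl
        (fun (st : List Int × Int) w =>
          let lc := w.toList.foldl
            (fun lc j => PySem.List.pySetD lc st.2 (PySem.List.pyGetD lc st.2 0 + f j)) st.1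
          (lc, st.2 + 1))
        (acc ++ List.replicate ws.length 0, (acc.length : Int))
      = (acc ++ ws.map (fun w => (w.toList.map f).sum), (acc.length + ws.length : Int)) := by
  induction ws generalizing acc with
  | nil => simp
  | cons w ws ih =>
    simp only [List.foldl_cons, List.length_cons]
    rw [inner_loop_eq f _ _ _ (by simp)]
    have hset : (acc ++ List.replicate (ws.length + 1) 0).set acc.length
        ((acc ++ List.replicate (ws.length + 1) 0).getD acc.length 0 + (w.toList.map f).sum)
        = (acc ++ [(w.toList.map f).sum]) ++ List.replicate ws.length 0 := by
      have hrep : List.replicate (ws.length + 1) (0:Int) = 0 :: List.replicate ws.length 0 := rfl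
      rw [hrep, List.getD_eq_getElem _ _ (by simp)]
      rw [List.getElem_append_right (by omega)]
      simp [List.set_append_right _ _ (le_refl _)]
    rw [hset]
    have hlen : (acc.length : Int) + 1 = (((acc ++ [(w.toList.map f).sum]).length : Nat) : Int) := by
      simp
    rw [hlen, ih (acc ++ [(w.toList.map f).sum])]
    simp [List.append_assoc]
    omega

-- B's loop decides that the word sums, preceded by p, are pairwise non-decreasing
theorem altLoop_some (idx : PySem.Dict Char Int) (ws : List String) (p : Int) :
    altLoop idx ws (some p)
      = decide ((p :: ws.map (fun w => w.toList.foldl (fun s c => s + idx.getD c 0) 0)).Pairwise (· ≤ ·)) := by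
  induction ws generalizing p with
  | nil => simp [altLoop]
  | cons w ws ih =>
    simp only [altLoop, List.map_cons]
    by_cases h : w.toList.foldl (fun s c => s + idx.getD c 0) 0 < p
    · rw [if_pos h]
      have hnp : ¬ ((p :: w.toList.foldl (fun s c => s + idx.getD c 0) 0
          :: ws.map (fun w => w.toList.foldl (fun s c => s + idx.getD c 0) 0)).Pairwise (· ≤ ·)) := by
        intro hp
        exact absurd (List.rel_of_pairwise_cons hp (List.mem_cons_self)) (not_le.mpr h)
      simp [hnp]
    · rw [if_neg h, ih]
      have hps : p ≤ w.toList.foldl (fun s c => s + idx.getD c 0) 0 := not_lt.mp h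
      simp only [decide_eq_decide]
      constructor
      · intro hp
        refine List.pairwise_cons.mpr ⟨?_, hp⟩
        intro y hy
        rcases List.mem_cons.mp hy with rfl | hy
        · exact hps
        · exact le_trans hps (List.rel_of_pairwise_cons hp hy)
      · intro hp
        exact (List.pairwise_cons.mp hp).2

theorem altLoop_eq (idx : PySem.Dict Char Int) (ws : List String) :
    altLoop idx ws none
      = decide ((ws.map (fun w => w.toList.foldl (fun s c => s + idx.getD c 0) 0)).Pairwise (· ≤ ·)) := by
  cases ws with
  | nil => simp [altLoop]
  | cons w ws =>
    simp only [altLoop, List.map_cons]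
    exact altLoop_some idx ws _

-- sorted(l) == l decides that l is non-decreasing
theorem sorted_eq_self_iff (l : List Int) :
    (PySem.List.sorted l (fun x => x) false = l) ↔ l.Pairwise (· ≤ ·) := by
  constructor
  · intro h
    have := PySem.List.sorted_pairwise l (fun x => x)
    rwa [h] at this
  · exact PySem.List.sorted_eq_self_of_pairwise l (fun x => x)

-- ===== VERDICT (by name: the statement is the Claim_ definition above) =====
theorem isAlienSorted_spec : Claim_equal_isAlienSorted := by
  intro words order _ _
  unfold Spec_isAlienSorted isAlienSorted isAlienSorted_alt
  simp only []
  have hdict : (PySem.List.pyRange 0 (order.toList.length) 1).foldl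
      (fun d i => d.insert (PySem.List.pyGetD order.toList i ' ') i) PySem.Dict.empty
      = (PySem.List.enumerate order.toList 0).foldl (fun d p => d.insert p.2 p.1) PySem.Dict.empty := by
    have := dict_build_eq order.toList order.toList 0 PySem.Dict.empty
      (by intro k hk; simpa using PySem.List.pyGetD_ofNat order.toList k ' ' hk)
    simpa using this
  rw [hdict]
  set idx := (PySem.List.enumerate order.toList 0).foldl (fun d p => d.insert p.2 p.1) PySem.Dict.empty
  have hsum : ∀ w : String, (w.toList.map (fun c => idx.getD c 0)).sum
      = w.toList.foldl (fun s c => s + idx.getD c 0) 0 := by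
    intro w
    rw [PySem.List.foldl_add]
    simp
  have houter := outer_loop_eq (fun c => idx.getD c 0) words []
  simp only [List.nil_append, List.length_nil, Nat.cast_zero] at houter
  rw [houter]
  rw [altLoop_eq]
  simp only [hsum]
  have hs := sorted_eq_self_iff (words.map (fun w => w.toList.foldl (fun s c => s + idx.getD c 0) 0))
  by_cases hp : (words.map (fun w => w.toList.foldl (fun s c => s + idx.getD c 0) 0)).Pairwise (· ≤ ·)
  · simp [hs.mpr hp, hp]
  · have hne : PySem.List.sorted (words.map (fun w => w.toList.foldl (fun s c => s + idx.getD c 0) 0)) (fun x => x) false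
        ≠ (words.map (fun w => w.toList.foldl (fun s c => s + idx.getD c 0) 0)) := fun h => hp (hs.mp h)
    simp [hne, hp]
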